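-- pv_equiv track=rewrite | github.com/lucasrp/edge-of-chaos | search/ingest.py | _split_archive_entries
-- ===== SOURCE A (Python) =====
-- def _split_archive_entries(content: str) -> list[tuple[str, str]]:
--     """Split archive markdown into individual entries."""
--     entries = []
--     current_title = None
--     current_lines = []
--
--     for line in content.splitlines():
--         if line.startswith("## ["):
--             if current_title and current_lines:
--                 entries.append((current_title, "\n".join(current_lines)))
--             current_title = line.lstrip("# ").strip()
--             current_lines = [line]
--         elif current_title:
--             current_lines.append(line)
--
--     if current_title and current_lines:
--         entries.append((current_title, "\n".join(current_lines)))
--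
--     return entries
-- ===== SOURCE B (Python) =====
-- def _split_archive_entries(content: str) -> list[tuple[str, str]]:
--     """Split archive markdown into individual entries (backward grouping pass)."""
--     entries = []
--     body = []
--     for line in reversed(content.splitlines()):
--         body.append(line)
--         if line.startswith("## ["):
--             body.reverse()
--             entries.append((line.lstrip("# ").strip(), "\n".join(body)))
--             body = []
--     entries.reverse()
--     return entries
-- ===== Notes on version B (the rewrite author's own statement) =====
-- stated objective: alternative
-- what changed: Replaces A's forward accumulate-and-flush loop with mutable title/body state by a single backward pass over reversed lines that groups each body up to its header and emits the entry at the header, reversing the entry list at the end.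
import Mathlib
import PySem

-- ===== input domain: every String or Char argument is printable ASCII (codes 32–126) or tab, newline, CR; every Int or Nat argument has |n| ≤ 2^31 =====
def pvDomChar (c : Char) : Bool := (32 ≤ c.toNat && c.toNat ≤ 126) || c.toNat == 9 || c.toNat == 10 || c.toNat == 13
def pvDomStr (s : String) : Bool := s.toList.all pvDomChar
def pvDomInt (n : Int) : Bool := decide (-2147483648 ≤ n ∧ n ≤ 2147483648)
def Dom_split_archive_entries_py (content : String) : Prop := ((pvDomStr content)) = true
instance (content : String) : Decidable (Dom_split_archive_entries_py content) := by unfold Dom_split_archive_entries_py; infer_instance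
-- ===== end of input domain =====

-- B replaces A's forward accumulate-and-flush with a single backward grouping pass (objective: alternative, same cost).

-- shared helper: Python's line.lstrip("# ") — hand port, exact: str.lstrip(chars)
-- removes exactly the leading characters belonging to the set {'#', ' '}
def pvLstripHashSpace (s : String) : String :=
  String.ofList (s.toList.dropWhile (fun c => c == '#' || c == ' '))

-- shared helper: line.lstrip("# ").strip()
def pvTitle (line : String) : String := PySem.Str.strip (pvLstripHashSpace line)

-- ===== PORT A =====
def pvStepA (st : List (String × String) × Option String × List String) (line : String) :
    List (String × String) × Option String × List String :=
  let (entries, ct, cls) := st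
  if PySem.Str.startswith line "## [" then
    let entries := if ((ct.getD "") != "") && !cls.isEmpty then
        entries ++ [(ct.getD "", PySem.Str.join "\n" cls)] else entries
    (entries, some (pvTitle line), [line])
  else if (ct.getD "") != "" then (entries, ct, cls ++ [line])
  else (entries, ct, cls)

def split_archive_entries_py (content : String) : List (String × String) :=
  let st := (PySem.Str.splitlines content).foldl pvStepA ([], none, [])
  if ((st.2.1.getD "") != "") && !st.2.2.isEmpty then
    st.1 ++ [(st.2.1.getD "", PySem.Str.join "\n" st.2.2)]
  else st.1

-- ===== PORT B =====
def pvStepB (line : String) (st : List (String × String) × List String) :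
    List (String × String) × List String :=
  let (entries, body) := st
  let body := body ++ [line]
  if PySem.Str.startswith line "## [" then
    (entries ++ [(pvTitle line, PySem.Str.join "\n" body.reverse)], [])
  else (entries, body)

def split_archive_entries_py_alt (content : String) : List (String × String) :=
  let st := (PySem.Str.splitlines content).foldr pvStepB ([], [])
  st.1.reverse

-- ===== PRECONDITION & SPEC =====
def Spec_split_archive_entries_py (content : String) (out : List (String × String)) : Prop := out = split_archive_entries_py_alt content
instance (content : String) (out : List (String × String)) : Decidable (Spec_split_archive_entries_py content out) := by unfold Spec_split_archive_entries_py; infer_instance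

-- ===== CLAIM (what is proved, stated in full; the proofs are below) =====
def Claim_equal_split_archive_entries_py : Prop := ∀ (content : String), Dom_split_archive_entries_py content → Spec_split_archive_entries_py content (split_archive_entries_py content)

-- ===== LEMMAS AND PROOFS =====

def pvP (l : String) : Bool := PySem.Str.startswith l "## ["

-- the common chronological specification: one entry per header line, with the
-- following non-header lines as its body
def pvH : List String → List (String × String)
  | [] => []
  | l :: ls =>
      if pvP l then
        (pvTitle l, PySem.Str.join "\n" (l :: ls.takeWhile (fun x => !pvP x))) :: pvH ls
      else pvH ls

theorem pvP_fun : (fun x => !PySem.Chars.startswith x.toList ['#', '#', ' ', '[']) = (fun x => !pvP x) := by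
  funext x; simp [pvP]

def pvFinish (st : List (String × String) × Option String × List String) : List (String × String) :=
  if ((st.2.1.getD "") != "") && !st.2.2.isEmpty then
    st.1 ++ [(st.2.1.getD "", PySem.Str.join "\n" st.2.2)]
  else st.1

theorem pvStripNe (rest : List Char) : PySem.Chars.strip ('[' :: rest) ≠ [] := by
  have h : PySem.Chars.isspace '[' = false := rfl
  simp [PySem.Chars.strip, PySem.Chars.lstrip, PySem.Chars.rstrip, h]
  exact ⟨'[', by simp, h⟩

theorem pvTitle_ne (l : String) (h : PySem.Chars.startswith l.toList ['#', '#', ' ', '['] = true) :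
    (pvTitle l != "") = true := by
  rw [PySem.Chars.startswith_iff] at h
  obtain ⟨rest, hrest⟩ := h
  have hl : l.toList = '#' :: '#' :: ' ' :: '[' :: rest := hrest.symm
  have hdrop : (pvLstripHashSpace l).toList = '[' :: rest := by
    simp [pvLstripHashSpace, hl]
  have hne : (pvTitle l).toList ≠ [] := by
    rw [pvTitle, PySem.Str.toList_strip, hdrop]; exact pvStripNe rest
  simp [bne_iff_ne]
  intro he; exact hne (by simp [he])

theorem pvH_dropWhile (ls : List String) :
    pvH (ls.dropWhile (fun x => !pvP x)) = pvH ls := by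
  induction ls with
  | nil => rfl
  | cons l ls ih =>
      by_cases h : pvP l = true
      · simp [h]
      · simp only [Bool.not_eq_true] at h
        simp [pvH, h, ih]

theorem pvB_fold (L : List String) :
    L.foldr pvStepB ([], []) =
      ((pvH L).reverse, (L.takeWhile (fun x => !pvP x)).reverse) := by
  induction L with
  | nil => rfl
  | cons l ls ih =>
      by_cases h : pvP l = true
      · simp [List.foldr_cons, ih, pvStepB, pvH, pvP] at h ⊢
        simp [h]
      · simp only [Bool.not_eq_true] at h
        simp [List.foldr_cons, ih, pvStepB, pvH, pvP] at h ⊢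
        simp [h]

theorem pvA_fold (L : List String) :
    ∀ (E : List (String × String)) (t : String) (cls : List String),
      (t != "") = true → cls ≠ [] →
      pvFinish (L.foldl pvStepA (E, some t, cls)) =
        E ++ (t, PySem.Str.join "\n" (cls ++ L.takeWhile (fun x => !pvP x))) ::
          pvH (L.dropWhile (fun x => !pvP x)) := by
  induction L with
  | nil =>
      intro E t cls ht hc
      simp [pvFinish, ht, hc, pvH]
  | cons l ls ih =>
      intro E t cls ht hc
      by_cases h : PySem.Chars.startswith l.toList ['#', '#', ' ', '['] = true
      · have hne := pvTitle_ne l h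
        simp [List.foldl_cons, pvStepA, h, ht, hc, pvP]
        rw [ih (E ++ [(t, PySem.Str.join "\n" cls)]) (pvTitle l) [l] hne (by simp)]
        simp [pvH, pvP, h]
        rw [pvP_fun]; exact pvH_dropWhile ls
      · have h' : PySem.Chars.startswith l.toList ['#', '#', ' ', '['] = false :=
          Bool.not_eq_true _ ▸ by simpa using h
        simp [List.foldl_cons, pvStepA, h', ht, pvP]
        rw [ih E t (cls ++ [l]) ht (by simp)]
        simp
        rw [pvP_fun]; exact ⟨rfl, rfl⟩

theorem pvA_fold0 (L : List String) :
    ∀ (E : List (String × String)),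
      pvFinish (L.foldl pvStepA (E, none, [])) = E ++ pvH L := by
  induction L with
  | nil => intro E; simp [pvFinish, pvH]
  | cons l ls ih =>
      intro E
      by_cases h : PySem.Chars.startswith l.toList ['#', '#', ' ', '['] = true
      · have hne := pvTitle_ne l h
        simp [List.foldl_cons, pvStepA, h]
        rw [pvA_fold ls E (pvTitle l) [l] hne (by simp)]
        simp [pvH, pvP, h]
        rw [pvP_fun]; exact pvH_dropWhile ls
      · have h' : PySem.Chars.startswith l.toList ['#', '#', ' ', '['] = false := by
          simpa using h
        simp [List.foldl_cons, pvStepA, h', pvH, pvP, ih]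

-- ===== VERDICT (by name: the statement is the Claim_ definition above) =====
theorem split_archive_entries_py_spec : Claim_equal_split_archive_entries_py := by
  intro content _
  unfold Spec_split_archive_entries_py
  show split_archive_entries_py content = split_archive_entries_py_alt content
  have hA : split_archive_entries_py content =
      pvFinish ((PySem.Str.splitlines content).foldl pvStepA ([], none, [])) := rfl
  have hB : split_archive_entries_py_alt content =
      ((PySem.Str.splitlines content).foldr pvStepB ([], [])).1.reverse := rfl
  rw [hA, hB, pvA_fold0 (PySem.Str.splitlines content) [], pvB_fold]
  simp
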